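-- pv_equiv track=rewrite | github.com/VISHNUAJI2002/Basic-coding-practice | greedy/gym_subscription_cost.py | gym_fee
-- ===== SOURCE A (Python) =====
-- def gym_fee(n):
--     if n % 3 != 0:
--         return "Error"
--
--     cost = 0
--     plans = [
--         (12, 15000),
--         (9, 12000),
--         (6, 9000),
--         (3, 5000)
--     ]
--
--     for months, price in plans:
--         count = n // months
--         cost += count * price
--         n %= months
--
--     return cost
-- ===== SOURCE B (Python) =====
-- def gym_fee(n):
--     if n % 3 != 0:
--         return "Error"
--     return n // 12 * 15000 + [0, 5000, 9000, 12000][int(n % 12 // 3)]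
-- ===== Notes on version B (the rewrite author's own statement) =====
-- stated objective: simpler
-- what changed: Replaces the greedy loop over the plan list (with running n %= months) by one floor-division for the 12-month blocks plus a fixed 4-entry surcharge table indexed by (n % 12) // 3.
-- outside the precondition, e.g. on gym_fee(1): A returns 'Error', B returns 'Error'
import Mathlib
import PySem

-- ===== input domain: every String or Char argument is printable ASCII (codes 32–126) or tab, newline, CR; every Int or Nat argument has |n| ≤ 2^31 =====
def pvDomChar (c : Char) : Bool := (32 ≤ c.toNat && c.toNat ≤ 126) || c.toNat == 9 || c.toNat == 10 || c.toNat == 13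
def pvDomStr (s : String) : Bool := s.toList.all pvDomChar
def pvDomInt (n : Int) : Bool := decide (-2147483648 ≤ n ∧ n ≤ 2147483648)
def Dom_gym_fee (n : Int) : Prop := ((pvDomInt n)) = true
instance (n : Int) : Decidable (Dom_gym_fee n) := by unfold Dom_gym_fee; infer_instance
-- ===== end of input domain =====

-- B replaces A's greedy loop by one division plus a fixed surcharge table (objective: simpler).
-- ===== PORT A =====
-- the loop 'for months, price in plans' over state (cost, n)
def gym_fee (n : Int) : Int :=
  (([((12:Int), (15000:Int)), (9, 12000), (6, 9000), (3, 5000)]).foldl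
    (fun (s : Int × Int) (p : Int × Int) =>
      (s.1 + PySem.Int.floordiv s.2 p.1 * p.2, PySem.Int.mod s.2 p.1))
    (0, n)).1

-- ===== PORT B =====
def gym_fee_alt (n : Int) : Int :=
  PySem.Int.floordiv n 12 * 15000 +
    PySem.List.pyGetD [(0:Int), 5000, 9000, 12000]
      (PySem.Int.floordiv (PySem.Int.mod n 12) 3) 0

-- ===== PRECONDITION & SPEC =====
-- Pre_ excludes n % 3 != 0, where A returns the string "Error", not an int (B does the same).
def Pre_gym_fee (n : Int) : Prop := PySem.Int.mod n 3 = 0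
instance (n : Int) : Decidable (Pre_gym_fee n) := by unfold Pre_gym_fee; infer_instance
def pvWitness_gym_fee : Int := 27
def Spec_gym_fee (n : Int) (out : Int) : Prop := out = gym_fee_alt n
instance (n : Int) (out : Int) : Decidable (Spec_gym_fee n out) := by unfold Spec_gym_fee; infer_instance

-- ===== CLAIM (what is proved, stated in full; the proofs are below) =====
def Claim_equal_gym_fee : Prop := ∀ (n : Int), Dom_gym_fee n → Pre_gym_fee n → Spec_gym_fee n (gym_fee n)

-- ===== LEMMAS AND PROOFS =====

-- ===== VERDICT (by name: the statement is the Claim_ definition above) =====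
theorem gym_fee_spec : Claim_equal_gym_fee := by
  intro n _ hpre
  unfold Spec_gym_fee gym_fee gym_fee_alt
  unfold Pre_gym_fee at hpre
  rw [PySem.Int.mod_eq_emod_of_pos (by omega)] at hpre
  simp only [List.foldl]
  have e12 : ∀ a : Int, PySem.Int.floordiv a 12 = a / 12 :=
    fun a => PySem.Int.floordiv_eq_ediv_of_pos (by norm_num)
  have m12 : ∀ a : Int, PySem.Int.mod a 12 = a % 12 :=
    fun a => PySem.Int.mod_eq_emod_of_pos (by norm_num)
  simp only [e12, m12]
  have h12 : n % 12 = 0 ∨ n % 12 = 3 ∨ n % 12 = 6 ∨ n % 12 = 9 := by omega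
  rcases h12 with h | h | h | h <;>
    simp only [h] <;> norm_num [PySem.List.pyGetD, PySem.List.pyGet?, PySem.List.pyIdx?] <;> decide
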